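-- pv_equiv track=rewrite | github.com/ayoubzulfiqar/Leetcode-Medium | WinningCandidate/winning_candidate.py | find_winning_candidate
-- ===== SOURCE A (Python) =====
-- import collections
--
-- def find_winning_candidate(votes):
--     if not votes:
--         return None
--
--     vote_counts = collections.Counter(votes)
--
--     max_votes = 0
--     for count in vote_counts.values():
--         if count > max_votes:
--             max_votes = count
--
--     tied_candidates = []
--     for candidate, count in vote_counts.items():
--         if count == max_votes:
--             tied_candidates.append(candidate)
--
--     return min(tied_candidates)
-- ===== SOURCE B (Python) =====
-- import collections
--
--
-- def find_winning_candidate(votes):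
--     # One pass over the Counter's items with a running (best_candidate, best_count)
--     # accumulator instead of A's three passes (max loop, tied list, min).
--     if not votes:
--         return None
--     items = iter(collections.Counter(votes).items())
--     best_candidate, best_count = next(items)
--     for candidate, count in items:
--         if count > best_count:
--             best_candidate, best_count = candidate, count
--         elif count == best_count and candidate < best_candidate:
--             best_candidate = candidate
--     return best_candidate
-- ===== Notes on version B (the rewrite author's own statement) =====
-- stated objective: simpler
-- what changed: A's three passes after building the Counter (a max-of-counts loop, a tied-candidates list build, and a final min) are fused into a single pass over the Counter's items maintaining a running (best_candidate, best_count) accumulator seeded from the first item.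
import Mathlib
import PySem

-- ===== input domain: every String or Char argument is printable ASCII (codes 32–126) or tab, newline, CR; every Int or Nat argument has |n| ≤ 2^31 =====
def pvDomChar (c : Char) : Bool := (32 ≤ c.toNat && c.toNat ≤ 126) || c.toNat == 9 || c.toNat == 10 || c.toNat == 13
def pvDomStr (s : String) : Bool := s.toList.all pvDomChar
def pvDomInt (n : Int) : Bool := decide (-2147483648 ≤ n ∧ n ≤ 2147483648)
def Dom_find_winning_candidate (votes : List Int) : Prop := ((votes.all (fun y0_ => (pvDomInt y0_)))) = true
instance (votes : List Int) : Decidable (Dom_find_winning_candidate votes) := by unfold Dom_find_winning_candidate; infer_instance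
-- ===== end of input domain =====

-- B fuses A's three passes after the Counter (max loop, tied-list build, final min)
-- into one pass with a running (best_candidate, best_count) accumulator: simpler, same cost.

-- ===== PORT A =====
def find_winning_candidate (votes : List Int) : Option Int :=
  if votes = [] then none
  else
    let vote_counts := PySem.Dict.counter votes
    let max_votes := (PySem.Dict.values vote_counts).foldl
      (fun m c => if c > m then c else m) 0
    let tied := vote_counts.items.foldl
      (fun acc p => if p.2 = max_votes then acc ++ [p.1] else acc) []
    PySem.List.min? tied (fun y => y)   -- min(tied_candidates); tied is never empty here

-- ===== PORT B =====
-- the loop body of B: state is (best_candidate, best_count)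
def fwcStep (s : Int × Int) (p : Int × Int) : Int × Int :=
  if p.2 > s.2 then (p.1, p.2)
  else if p.2 = s.2 ∧ p.1 < s.1 then (p.1, s.2)
  else s

def find_winning_candidate_alt (votes : List Int) : Option Int :=
  if votes = [] then none
  else
    match (PySem.Dict.counter votes).items with
    | [] => none   -- unreachable: the Counter of a nonempty list is nonempty
    | p :: rest => some (rest.foldl fwcStep p).1

-- ===== PRECONDITION & SPEC =====
def Spec_find_winning_candidate (votes : List Int) (out : Option Int) : Prop := out = find_winning_candidate_alt votes
instance (votes : List Int) (out : Option Int) : Decidable (Spec_find_winning_candidate votes out) := by unfold Spec_find_winning_candidate; infer_instance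

-- ===== CLAIM (what is proved, stated in full; the proofs are below) =====
def Claim_equal_find_winning_candidate : Prop := ∀ (votes : List Int), Dom_find_winning_candidate votes → Spec_find_winning_candidate votes (find_winning_candidate votes)

-- ===== LEMMAS AND PROOFS =====

-- running max of the counts, as A's first loop computes it
def fwcMax (c : Int) (l : List (Int × Int)) : Int :=
  l.foldl (fun m p => if p.2 > m then p.2 else m) c

-- candidates tied at count M, in items order
def fwcWinners (M : Int) (l : List (Int × Int)) : List Int :=
  (l.filter (fun p => p.2 = M)).map Prod.fst

-- running min with an optional seed
def fwcMinFrom (o : Option Int) (ws : List Int) : Option Int :=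
  ws.foldl (fun acc c => some (match acc with | none => c | some b => min b c)) o

theorem fwcMax_cons (c : Int) (p : Int × Int) (l : List (Int × Int)) :
    fwcMax c (p :: l) = fwcMax (if p.2 > c then p.2 else c) l := rfl

theorem le_fwcMax (c : Int) (l : List (Int × Int)) : c ≤ fwcMax c l := by
  induction l generalizing c with
  | nil => exact le_refl c
  | cons p l ih =>
      rw [fwcMax_cons]
      refine le_trans ?_ (ih _)
      split <;> omega

theorem fwcWinners_cons (M : Int) (a n : Int) (l : List (Int × Int)) :
    fwcWinners M ((a, n) :: l)
      = if n = M then a :: fwcWinners M l else fwcWinners M l := by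
  by_cases h : n = M <;> simp [fwcWinners, h]

theorem fwcMinFrom_none_cons (a : Int) (ws : List Int) :
    fwcMinFrom none (a :: ws) = fwcMinFrom (some a) ws := rfl

theorem fwcMinFrom_some_cons (b a : Int) (ws : List Int) :
    fwcMinFrom (some b) (a :: ws) = fwcMinFrom (some (min b a)) ws := rfl

theorem fwcMinFrom_some (b : Int) (ws : List Int) :
    fwcMinFrom (some b) ws = some (ws.foldl min b) := by
  induction ws generalizing b with
  | nil => rfl
  | cons c ws ih => rw [fwcMinFrom_some_cons, ih, List.foldl_cons]

theorem min?_eq_fwcMinFrom (ws : List Int) :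
    PySem.List.min? ws (fun y => y) = fwcMinFrom none ws := by
  cases ws with
  | nil => rfl
  | cons x t => rw [PySem.List.min?_id_cons, fwcMinFrom_none_cons, fwcMinFrom_some]

-- A's tied-list loop builds exactly fwcWinners (prop-valued `if`, so
-- PySem.List.foldl_append_if's Bool pattern does not apply directly)
theorem tied_eq_winners (M : Int) (l : List (Int × Int)) (acc : List Int) :
    l.foldl (fun acc p => if p.2 = M then acc ++ [p.1] else acc) acc
      = acc ++ fwcWinners M l := by
  induction l generalizing acc with
  | nil => simp [fwcWinners]
  | cons p l ih =>
      obtain ⟨a, n⟩ := p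
      rw [List.foldl_cons, fwcWinners_cons]
      by_cases h : n = M
      · rw [if_pos h, if_pos h, ih, List.append_assoc]; rfl
      · rw [if_neg h, if_neg h, ih]

-- the single-pass fold computes the max count and the min of the tied candidates
theorem fwc_core (l : List (Int × Int)) (b c : Int) :
    (l.foldl fwcStep (b, c)).2 = fwcMax c l ∧
    fwcMinFrom (if c = fwcMax c l then some b else none) (fwcWinners (fwcMax c l) l)
      = some (l.foldl fwcStep (b, c)).1 := by
  induction l generalizing b c with
  | nil => simp [fwcMax, fwcWinners, fwcMinFrom]
  | cons p l ih =>
      obtain ⟨a, n⟩ := p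
      rw [List.foldl_cons, fwcMax_cons]
      simp only [fwcStep]
      by_cases h1 : n > c
      · simp only [if_pos h1]
        have hM : ¬ c = fwcMax n l := by
          have := le_fwcMax n l; omega
        rcases ih a n with ⟨ih1, ih2⟩
        refine ⟨ih1, ?_⟩
        rw [if_neg hM, fwcWinners_cons]
        by_cases hn : n = fwcMax n l
        · rw [if_pos hn, fwcMinFrom_none_cons]
          rw [if_pos hn] at ih2
          exact ih2
        · rw [if_neg hn]
          rw [if_neg hn] at ih2
          exact ih2
      · have hMx : (if ((a, n) : Int × Int).2 > c then ((a, n) : Int × Int).2 else c) = c := by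
          simp only; omega
        rw [hMx]
        simp only [if_neg h1]
        rw [fwcWinners_cons]
        by_cases h2 : n = c ∧ a < b
        · rw [if_pos h2]
          rcases ih a c with ⟨ih1, ih2⟩
          refine ⟨ih1, ?_⟩
          by_cases hc : c = fwcMax c l
          · rw [if_pos hc] at ih2 ⊢
            rw [if_pos (h2.1.trans hc), fwcMinFrom_some_cons, min_eq_right (le_of_lt h2.2)]
            exact ih2
          · rw [if_neg hc] at ih2 ⊢
            have hn : ¬ n = fwcMax c l := h2.1 ▸ hc
            rw [if_neg hn]
            exact ih2
        · rw [if_neg h2]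
          rcases ih b c with ⟨ih1, ih2⟩
          refine ⟨ih1, ?_⟩
          by_cases hn : n = fwcMax c l
          · have hc : c = fwcMax c l := by
              have := le_fwcMax c l; omega
            have hba : b ≤ a := by
              rcases not_and_or.mp h2 with h | h
              · omega
              · omega
            rw [if_pos hc] at ih2 ⊢
            rw [if_pos hn, fwcMinFrom_some_cons, min_eq_left hba]
            exact ih2
          · rw [if_neg hn]
            exact ih2

-- ===== VERDICT (by name: the statement is the Claim_ definition above) =====
theorem find_winning_candidate_spec : Claim_equal_find_winning_candidate := by
  intro votes _
  show find_winning_candidate votes = find_winning_candidate_alt votes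
  by_cases hv : votes = []
  · simp [find_winning_candidate, find_winning_candidate_alt, hv]
  · rw [find_winning_candidate, find_winning_candidate_alt, if_neg hv, if_neg hv]
    -- zeta-reduce A's lets; d.values is by definition d.items.map Prod.snd
    show PySem.List.min?
        ((PySem.Dict.counter votes).items.foldl
          (fun acc q => if q.2 = (((PySem.Dict.counter votes).items.map Prod.snd).foldl
              (fun m c => if c > m then c else m) 0) then acc ++ [q.1] else acc) [])
        (fun y => y)
      = match (PySem.Dict.counter votes).items with
        | [] => none
        | p :: rest => some (rest.foldl fwcStep p).1
    rw [List.foldl_map]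
    obtain ⟨v, vs, hvv⟩ := List.exists_cons_of_ne_nil hv
    have hmemv : v ∈ PySem.Set.ofList votes :=
      (PySem.Set.mem_ofList votes v).mpr (hvv ▸ List.mem_cons_self)
    cases hit : (PySem.Dict.counter votes).items with
    | nil =>
        -- unreachable: the Counter of a nonempty list has an item
        exfalso
        rw [PySem.Dict.items_counter] at hit
        rw [List.map_eq_nil_iff.mp hit] at hmemv
        simp at hmemv
    | cons p rest =>
        -- the head count is positive (it is a count of an element of votes)
        have hpmem : p ∈ (PySem.Dict.counter votes).items := by
          rw [hit]; exact List.mem_cons_self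
        have hp2 : 0 < p.2 := by
          rw [PySem.Dict.items_counter] at hpmem
          obtain ⟨k, hk, hkp⟩ := List.mem_map.mp hpmem
          rw [← hkp]
          show (0 : Int) < (votes.count k : Int)
          exact_mod_cast List.count_pos_iff.mpr ((PySem.Set.mem_ofList votes k).mp hk)
        show PySem.List.min?
            ((p :: rest).foldl
              (fun acc q => if q.2 = fwcMax 0 (p :: rest) then acc ++ [q.1] else acc) [])
            (fun y => y)
          = some (rest.foldl fwcStep p).1
        have hM0 : fwcMax 0 (p :: rest) = fwcMax p.2 rest := by
          rw [fwcMax_cons, if_pos hp2]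
        rw [hM0, tied_eq_winners, List.nil_append, min?_eq_fwcMinFrom]
        rcases fwc_core rest p.1 p.2 with ⟨_, hmin⟩
        obtain ⟨a, n⟩ := p
        rw [fwcWinners_cons]
        by_cases hp : n = fwcMax n rest
        · rw [if_pos hp, fwcMinFrom_none_cons]
          rw [if_pos hp] at hmin
          exact hmin
        · rw [if_neg hp]
          rw [if_neg hp] at hmin
          exact hmin
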